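-- pv_equiv track=rewrite | github.com/kergene/advent-code | 2017/code_day_09.py | group_score
-- ===== SOURCE A (Python) =====
-- def group_score(data):
--     idx = 0
--     n = len(data)
--     garbage = False
--     score = 0
--     value = 0
--     while idx < n:
--         if data[idx] == '!':
--             idx += 2
--             continue
--         else:
--             if garbage:
--                 if data[idx] == '>':
--                     garbage = False
--             else:
--                 if data[idx] == '<':
--                     garbage = True
--                 elif data[idx] == '{':
--                     value += 1
--                 elif data[idx] == '}':
--                     score += value
--                     value -= 1
--             idx += 1
--     return score
-- ===== SOURCE B (Python) =====
-- def group_score(data):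
--     # Phase 1: extract the '{'/'}' characters that lie outside garbage.
--     braces = []
--     skip = False
--     garbage = False
--     for ch in data:
--         if skip:
--             skip = False
--         elif ch == '!':
--             skip = True
--         elif garbage:
--             garbage = ch != '>'
--         elif ch == '<':
--             garbage = True
--         elif ch == '{' or ch == '}':
--             braces.append(ch)
--     # Phase 2: fold a depth counter over the brace sequence.
--     score = 0
--     value = 0
--     for ch in braces:
--         if ch == '{':
--             value += 1
--         else:
--             score += value
--             value -= 1
--     return score
-- ===== Notes on version B (the rewrite author's own statement) =====
-- stated objective: alternative
-- what changed: B splits the computation into two passes: a character-iterator with a skip flag that filters out garbage and keeps only the braces, then a separate fold over that brace sequence computing the score; A interleaves scoring with the escape/garbage handling in one index-jumping while loop.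
import Mathlib
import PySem

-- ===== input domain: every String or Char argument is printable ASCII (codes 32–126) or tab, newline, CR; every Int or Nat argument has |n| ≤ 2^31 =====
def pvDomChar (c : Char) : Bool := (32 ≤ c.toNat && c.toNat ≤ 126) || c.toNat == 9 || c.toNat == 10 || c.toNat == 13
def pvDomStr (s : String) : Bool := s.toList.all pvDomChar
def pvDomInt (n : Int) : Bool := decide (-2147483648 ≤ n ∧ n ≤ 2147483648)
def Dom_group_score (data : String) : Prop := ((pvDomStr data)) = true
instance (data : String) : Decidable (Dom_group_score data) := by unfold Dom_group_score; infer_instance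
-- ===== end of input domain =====

-- B restructures A's single index-jumping loop into two passes (garbage filter, then a scoring
-- fold); same return value, no side effects in either.

-- ===== PORT A =====
-- the while loop of A: `idx += 2` on '!' becomes recursing on rest.tail
def pvLoopA : List Char → Bool → Int → Int → Int
  | [], _, score, _ => score
  | c :: rest, garbage, score, value =>
    if c = '!' then pvLoopA rest.tail garbage score value
    else if garbage then pvLoopA rest (if c = '>' then false else garbage) score value
    else if c = '<' then pvLoopA rest true score value
    else if c = '{' then pvLoopA rest garbage score (value + 1)
    else if c = '}' then pvLoopA rest garbage (score + value) (value - 1)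
    else pvLoopA rest garbage score value
  termination_by l => l.length
  decreasing_by all_goals simp [List.length_tail]

def group_score (data : String) : Int := pvLoopA data.toList false 0 0

-- ===== PORT B =====
-- phase 1 of Source B: keep only the braces outside garbage (skip flag for '!')
def pvFilter : List Char → Bool → Bool → List Char
  | [], _, _ => []
  | c :: rest, skip, garbage =>
    if skip then pvFilter rest false garbage
    else if c = '!' then pvFilter rest true garbage
    else if garbage then pvFilter rest false (c != '>')
    else if c = '<' then pvFilter rest false true
    else if c = '{' || c = '}' then c :: pvFilter rest false false
    else pvFilter rest false false

-- phase 2 of Source B: the scoring fold over the brace sequence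
def pvStep (sv : Int × Int) (c : Char) : Int × Int :=
  if c = '{' then (sv.1, sv.2 + 1) else (sv.1 + sv.2, sv.2 - 1)

def group_score_alt (data : String) : Int :=
  ((pvFilter data.toList false false).foldl pvStep (0, 0)).1

-- ===== PRECONDITION & SPEC =====
def Spec_group_score (data : String) (out : Int) : Prop := out = group_score_alt data
instance (data : String) (out : Int) : Decidable (Spec_group_score data out) := by unfold Spec_group_score; infer_instance

-- ===== CLAIM (what is proved, stated in full; the proofs are below) =====
def Claim_equal_group_score : Prop := ∀ (data : String), Dom_group_score data → Spec_group_score data (group_score data)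

-- ===== LEMMAS AND PROOFS =====
-- the score component of the fold is the start score plus the fold from score 0
theorem pvStep_shift (l : List Char) (s v : Int) :
    List.foldl pvStep (s, v) l
      = (s + (List.foldl pvStep (0, v) l).1, (List.foldl pvStep (0, v) l).2) := by
  induction l generalizing s v with
  | nil => simp
  | cons c l ih =>
    simp only [List.foldl_cons, pvStep]
    by_cases hc : c = '{' <;> simp [hc]
    · rw [ih]
    · rw [ih (s + v), ih v]; simp; ring

-- one-step relation: '!' skips the next character exactly like rest.tail
theorem pvFilter_skip (rest : List Char) (g : Bool) :
    pvFilter rest true g = pvFilter rest.tail false g := by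
  cases rest <;> simp [pvFilter]

theorem pvLoopA_eq (n : Nat) (l : List Char) (hl : l.length ≤ n) (g : Bool) (s v : Int) :
    pvLoopA l g s v = s + (List.foldl pvStep (0, v) (pvFilter l false g)).1 := by
  induction n generalizing l g s v with
  | zero =>
    have : l = [] := by cases l <;> simp_all
    subst this; simp [pvLoopA, pvFilter]
  | succ n ih =>
    cases l with
    | nil => simp [pvLoopA, pvFilter]
    | cons c rest =>
      simp only [List.length_cons, Nat.succ_le_succ_iff] at hl
      by_cases hb : c = '!'
      · have htail : rest.tail.length ≤ n := le_trans (by cases rest <;> simp) hl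
        simp [pvLoopA, pvFilter, hb, pvFilter_skip, ih rest.tail htail]
      · by_cases hg : g = true
        · by_cases hc : c = '>'
          · simp [pvLoopA, pvFilter, hb, hg, hc, ih rest hl]
          · have hne : (c != '>') = true := by simp [hc]
            simp [pvLoopA, pvFilter, hb, hg, hc, hne, ih rest hl]
        · simp only [Bool.not_eq_true] at hg
          by_cases h1 : c = '<'
          · simp [pvLoopA, pvFilter, hb, hg, h1, ih rest hl]
          · by_cases h2 : c = '{'
            · simp [pvLoopA, pvFilter, hb, hg, h1, h2, pvStep, ih rest hl]
            · by_cases h3 : c = '}'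
              · have e1 : pvStep (0, v) '}' = (v, -1 + v) := by simp [pvStep]; ring
                simp [pvLoopA, pvFilter, hb, hg, h1, h2, h3, e1, ih rest hl]
                rw [pvStep_shift (pvFilter rest false false) v (-1 + v)]
                simp
                ring
              · simp [pvLoopA, pvFilter, hb, hg, h1, h2, h3, ih rest hl]

-- ===== VERDICT (by name: the statement is the Claim_ definition above) =====
theorem group_score_spec : Claim_equal_group_score := by
  intro data _
  unfold Spec_group_score group_score group_score_alt
  rw [pvLoopA_eq data.toList.length data.toList le_rfl]
  simp
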